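-- pv_equiv track=rewrite | github.com/shuo1104/database-bate-0.3 | backend_fastapi/app/agent/tools/sql/guard.py | _max_select_parenthesis_depth
-- ===== SOURCE A (Python) =====
-- def _max_select_parenthesis_depth(normalized_upper: str) -> int:
--     depth = 0
--     max_select_depth = 0
--     idx = 0
--     total_length = len(normalized_upper)
--
--     while idx < total_length:
--         char = normalized_upper[idx]
--
--         if char == "(":
--             depth += 1
--             idx += 1
--             continue
--         if char == ")":
--             depth = max(depth - 1, 0)
--             idx += 1
--             continue
--
--         if normalized_upper.startswith("SELECT", idx):
--             prev_char = normalized_upper[idx - 1] if idx > 0 else " "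
--             next_idx = idx + 6
--             next_char = (
--                 normalized_upper[next_idx] if next_idx < total_length else " "
--             )
--             if not (prev_char.isalnum() or prev_char == "_") and not (
--                 next_char.isalnum() or next_char == "_"
--             ):
--                 max_select_depth = max(max_select_depth, depth)
--                 idx += 6
--                 continue
--
--         idx += 1
--
--     return max_select_depth
-- ===== SOURCE B (Python) =====
-- def _max_select_parenthesis_depth(normalized_upper: str) -> int:
--     s = normalized_upper
--     n = len(s)
--     # pass 1: depth profile (clamped at zero on ')')
--     depth_before = []
--     d = 0
--     for ch in s:
--         depth_before.append(d)
--         if ch == '(':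
--             d += 1
--         elif ch == ')':
--             d = max(d - 1, 0)
--
--     def word(c):
--         return c.isalnum() or c == '_'
--
--     # pass 2: word-bounded SELECT occurrences, looked up in the profile
--     starts = [i for i in range(n - 5)
--               if s[i:i + 6] == 'SELECT'
--               and (i == 0 or not word(s[i - 1]))
--               and (i + 6 == n or not word(s[i + 6]))]
--     return max((depth_before[i] for i in starts), default=0)
-- ===== Notes on version B (the rewrite author's own statement) =====
-- stated objective: alternative
-- what changed: Replaces A's single interleaved scan (mutable depth + in-place boundary-checked SELECT match with a 6-char skip) by two independent passes: first build a depth-before profile table, then collect all word-bounded SELECT start positions and take the max profile value over them.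
import Mathlib
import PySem

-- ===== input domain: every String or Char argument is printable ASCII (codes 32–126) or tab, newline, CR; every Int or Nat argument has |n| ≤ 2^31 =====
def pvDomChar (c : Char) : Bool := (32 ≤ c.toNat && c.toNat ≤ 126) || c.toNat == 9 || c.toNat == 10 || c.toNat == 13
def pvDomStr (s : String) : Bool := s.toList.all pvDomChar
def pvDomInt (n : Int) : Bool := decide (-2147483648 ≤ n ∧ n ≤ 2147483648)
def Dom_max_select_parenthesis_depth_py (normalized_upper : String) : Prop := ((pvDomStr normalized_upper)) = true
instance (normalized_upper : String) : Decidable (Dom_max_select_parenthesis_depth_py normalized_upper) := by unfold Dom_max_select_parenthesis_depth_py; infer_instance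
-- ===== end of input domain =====

-- B replaces A's single interleaved scan by two passes (depth-profile table, then a
-- word-bounded SELECT position pass); same cost, different decomposition ("alternative").

-- ===== PORT A =====
-- literal port of A's while loop (index cursor, mutable depth/max, 6-char skip on a match)
def pvLoopA (cs : List Char) (n : Nat) (depth maxd : Int) (idx : Nat) : Int :=
  if h : idx < n then
    let c := cs.getD idx ' '
    if c = '(' then pvLoopA cs n (depth + 1) maxd (idx + 1)
    else if c = ')' then pvLoopA cs n (max (depth - 1) 0) maxd (idx + 1)
    else if (cs.drop idx).take 6 = ['S','E','L','E','C','T'] then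
      let prev := if 0 < idx then cs.getD (idx - 1) ' ' else ' '
      let next := if idx + 6 < n then cs.getD (idx + 6) ' ' else ' '
      if !(prev.isAlphanum || prev == '_') && !(next.isAlphanum || next == '_') then
        pvLoopA cs n depth (max maxd depth) (idx + 6)
      else pvLoopA cs n depth maxd (idx + 1)
    else pvLoopA cs n depth maxd (idx + 1)
  else maxd
termination_by n - idx
decreasing_by all_goals omega

def max_select_parenthesis_depth_py (normalized_upper : String) : Int :=
  pvLoopA normalized_upper.toList normalized_upper.toList.length 0 0 0

-- ===== PORT B =====
-- the per-character depth update of B's first pass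
def pvStepD (d : Int) (c : Char) : Int :=
  if c = '(' then d + 1 else if c = ')' then max (d - 1) 0 else d

-- pass 1 of Source B: depth_before profile
def pvProfile (cs : List Char) (d : Int) : List Int :=
  match cs with
  | [] => []
  | c :: rest => d :: pvProfile rest (pvStepD d c)

-- Source B's `word` helper
def pvWord (c : Char) : Bool := c.isAlphanum || c == '_'

-- the comprehension condition of Source B's `starts`
def pvIsStart (cs : List Char) (n : Nat) (i : Nat) : Bool :=
  ((cs.drop i).take 6 == ['S','E','L','E','C','T'])
    && (i == 0 || !pvWord (cs.getD (i - 1) ' '))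
    && (i + 6 == n || !pvWord (cs.getD (i + 6) ' '))

def max_select_parenthesis_depth_py_alt (normalized_upper : String) : Int :=
  let cs := normalized_upper.toList
  let n := cs.length
  let prof := pvProfile cs 0
  let starts := (List.range (n - 5)).filter (pvIsStart cs n)
  let vals := starts.map (fun i => prof.getD i 0)
  match PySem.List.max? vals (fun x => x) with
  | some v => v
  | none => 0

-- ===== PRECONDITION & SPEC =====
def Spec_max_select_parenthesis_depth_py (normalized_upper : String) (out : Int) : Prop := out = max_select_parenthesis_depth_py_alt normalized_upper
instance (normalized_upper : String) (out : Int) : Decidable (Spec_max_select_parenthesis_depth_py normalized_upper out) := by unfold Spec_max_select_parenthesis_depth_py; infer_instance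

-- ===== CLAIM (what is proved, stated in full; the proofs are below) =====
def Claim_equal_max_select_parenthesis_depth_py : Prop := ∀ (normalized_upper : String), Dom_max_select_parenthesis_depth_py normalized_upper → Spec_max_select_parenthesis_depth_py normalized_upper (max_select_parenthesis_depth_py normalized_upper)

-- ===== LEMMAS AND PROOFS =====

-- depth after processing the first i characters
def pvDAt (cs : List Char) (i : Nat) : Int := (cs.take i).foldl pvStepD 0

-- the fold step both sides are reduced to
def pvGMax (cs : List Char) (n : Nat) (acc : Int) (i : Nat) : Int :=
  if pvIsStart cs n i then max acc (pvDAt cs i) else acc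

theorem pvStepD_nonneg (d : Int) (c : Char) (h : 0 ≤ d) : 0 ≤ pvStepD d c := by
  unfold pvStepD; split_ifs with h1 h2
  · omega
  · exact le_max_right _ _
  · exact h

theorem pvFoldl_stepD_nonneg (l : List Char) (d : Int) (h : 0 ≤ d) :
    0 ≤ l.foldl pvStepD d := by
  induction l generalizing d with
  | nil => exact h
  | cons c t ih => exact ih _ (pvStepD_nonneg _ _ h)

theorem pvDAt_succ (cs : List Char) (i : Nat) (h : i < cs.length) :
    pvDAt cs (i + 1) = pvStepD (pvDAt cs i) (cs.getD i ' ') := by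
  unfold pvDAt
  rw [List.take_succ, List.foldl_append, List.getElem?_eq_getElem h]
  simp [List.getD, List.getElem?_eq_getElem h]

theorem pvProfile_length (cs : List Char) (d : Int) : (pvProfile cs d).length = cs.length := by
  induction cs generalizing d with
  | nil => rfl
  | cons c t ih => simp [pvProfile, ih]

theorem pvProfile_getD (cs : List Char) (d : Int) (i : Nat) (h : i < cs.length) :
    (pvProfile cs d).getD i 0 = (cs.take i).foldl pvStepD d := by
  induction cs generalizing d i with
  | nil => simp at h
  | cons c t ih =>
    cases i with
    | zero => simp [pvProfile]
    | succ j =>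
      simp only [pvProfile, List.getD_cons_succ, List.take_succ_cons, List.foldl_cons]
      exact ih _ _ (by simpa using h)

theorem pvProfile_getD_nonneg (cs : List Char) (i : Nat) :
    0 ≤ (pvProfile cs 0).getD i 0 := by
  by_cases h : i < cs.length
  · rw [pvProfile_getD cs 0 i h]; exact pvFoldl_stepD_nonneg _ _ le_rfl
  · rw [List.getD_eq_default _ _ (by rw [pvProfile_length]; omega)]

-- a true start needs the full 6-char slice: i + 6 ≤ length
theorem pvSlice_bound {cs : List Char} {i : Nat}
    (h : (cs.drop i).take 6 = ['S','E','L','E','C','T']) : i + 6 ≤ cs.length := by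
  have := congrArg List.length h
  simp [List.length_take, List.length_drop] at this
  omega

theorem pvSlice_get {cs : List Char} {i : Nat}
    (h : (cs.drop i).take 6 = ['S','E','L','E','C','T']) (k : Nat) (hk : k < 6) :
    cs.getD (i + k) ' ' = ['S','E','L','E','C','T'].getD k ' ' := by
  have hb := pvSlice_bound h
  have h1 : cs[i + k]? = ((cs.drop i).take 6)[k]? := by
    rw [List.getElem?_take_of_lt hk, List.getElem?_drop]
  rw [h] at h1
  simp only [List.getD]
  rw [h1]

theorem pvIsStart_false_of_short {cs : List Char} {n i : Nat}
    (h : ¬ (cs.drop i).take 6 = ['S','E','L','E','C','T']) : pvIsStart cs n i = false := by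
  unfold pvIsStart
  simp only [Bool.and_eq_false_iff]
  left; left
  simpa using h

theorem pvLoopA_eq (cs : List Char) (n : Nat) (depth maxd : Int) (idx : Nat) :
    pvLoopA cs n depth maxd idx =
      if idx < n then
        let c := cs.getD idx ' '
        if c = '(' then pvLoopA cs n (depth + 1) maxd (idx + 1)
        else if c = ')' then pvLoopA cs n (max (depth - 1) 0) maxd (idx + 1)
        else if (cs.drop idx).take 6 = ['S','E','L','E','C','T'] then
          let prev := if 0 < idx then cs.getD (idx - 1) ' ' else ' '
          let next := if idx + 6 < n then cs.getD (idx + 6) ' ' else ' '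
          if !(prev.isAlphanum || prev == '_') && !(next.isAlphanum || next == '_') then
            pvLoopA cs n depth (max maxd depth) (idx + 6)
          else pvLoopA cs n depth maxd (idx + 1)
        else pvLoopA cs n depth maxd (idx + 1)
      else maxd := by
  rw [pvLoopA]
  split <;> rfl

-- A's inline boundary test agrees with pvIsStart when the slice matches
theorem pvBoundary_eq (cs : List Char) (idx : Nat)
    (hs : (cs.drop idx).take 6 = ['S','E','L','E','C','T']) :
    ((!((if 0 < idx then cs.getD (idx - 1) ' ' else ' ').isAlphanum
          || (if 0 < idx then cs.getD (idx - 1) ' ' else ' ') == '_'))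
      && (!((if idx + 6 < cs.length then cs.getD (idx + 6) ' ' else ' ').isAlphanum
          || (if idx + 6 < cs.length then cs.getD (idx + 6) ' ' else ' ') == '_')))
    = pvIsStart cs cs.length idx := by
  have hb := pvSlice_bound hs
  unfold pvIsStart pvWord
  have hsl : ((cs.drop idx).take 6 == ['S','E','L','E','C','T']) = true := by
    simpa using hs
  rw [hsl, Bool.true_and]
  congr 1
  · by_cases h0 : 0 < idx
    · simp [h0, show ¬ idx = 0 from by omega]
    · have h0' : idx = 0 := by omega
      subst h0'
      simp
  · by_cases h6 : idx + 6 < cs.length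
    · simp [h6, show ¬ (idx + 6 = cs.length) from by omega]
    · have h6' : idx + 6 = cs.length := by omega
      simp [h6']

theorem pvIsStart_lt {cs : List Char} {i : Nat}
    (h : pvIsStart cs cs.length i = true) : i < cs.length - 5 := by
  unfold pvIsStart at h
  simp only [Bool.and_eq_true, beq_iff_eq] at h
  have := pvSlice_bound h.1.1
  omega

theorem pvGMax_noops (cs : List Char) (n : Nat) (a : Int) (l : List Nat)
    (h : ∀ i ∈ l, pvIsStart cs n i = false) : l.foldl (pvGMax cs n) a = a := by
  induction l generalizing a with
  | nil => rfl
  | cons x t ih =>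
    rw [List.foldl_cons]
    have hx := h x (List.mem_cons_self)
    rw [show pvGMax cs n a x = a from by simp [pvGMax, hx]]
    exact ih a (fun i hi => h i (List.mem_cons_of_mem _ hi))

theorem pvAltList (cs : List Char) :
    (match PySem.List.max? (((List.range (cs.length - 5)).filter (pvIsStart cs cs.length)).map
        (fun i => (pvProfile cs 0).getD i 0)) (fun x => x) with
      | some v => v
      | none => 0)
      = (List.range' 0 cs.length).foldl (pvGMax cs cs.length) 0 := by
  set n := cs.length with hn
  set vals := ((List.range (n - 5)).filter (pvIsStart cs n)).map
      (fun i => (pvProfile cs 0).getD i 0) with hvals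
  have hnoop : ∀ i ∈ List.range' (n - 5) (n - (n - 5)), pvIsStart cs n i = false := by
    intro i hi
    have hge : n - 5 ≤ i := (List.mem_range'_1.mp hi).1
    cases hb : pvIsStart cs n i
    · rfl
    · have := pvIsStart_lt (hn ▸ hb)
      omega
  have hsplit : List.range' 0 (n - 5) ++ List.range' (n - 5) (n - (n - 5)) = List.range' 0 n := by
    have h := @List.range'_append 0 (n - 5) (n - (n - 5)) 1
    simp only [Nat.one_mul, Nat.zero_add] at h
    rw [h]
    congr 1
    omega
  have hfold : vals.foldl max 0 = (List.range' 0 n).foldl (pvGMax cs n) 0 := by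
    rw [← hsplit, List.foldl_append,
      pvGMax_noops cs n _ (List.range' (n - 5) (n - (n - 5))) hnoop]
    rw [hvals, List.foldl_map, ← PySem.List.foldl_if_eq_foldl_filter, List.range_eq_range']
    apply PySem.List.foldl_congr_mem
    intro acc i hi
    have hlt : i < cs.length := by
      have := (List.mem_range'_1.mp hi).2
      omega
    unfold pvGMax pvDAt
    rw [pvProfile_getD cs 0 i hlt]
  cases hv : vals with
  | nil =>
    rw [hv] at hfold
    exact hfold
  | cons x t =>
    have hx : 0 ≤ x := by
      have hmem : x ∈ vals := by rw [hv]; exact List.mem_cons_self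
      rw [hvals] at hmem
      obtain ⟨i, _, hix⟩ := List.mem_map.mp hmem
      rw [← hix]
      exact pvProfile_getD_nonneg cs i
    rw [hv] at hfold
    rw [List.foldl_cons, max_comm, max_eq_left hx] at hfold
    rw [PySem.List.max?_id_cons]
    exact hfold

theorem pvMainB (s : String) :
    max_select_parenthesis_depth_py_alt s =
      (List.range' 0 s.toList.length).foldl (pvGMax s.toList s.toList.length) 0 := by
  unfold max_select_parenthesis_depth_py_alt
  exact pvAltList s.toList

theorem pvDAt_id_step (cs : List Char) (i : Nat) (h : i < cs.length)
    (h1 : cs.getD i ' ' ≠ '(') (h2 : cs.getD i ' ' ≠ ')') :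
    pvDAt cs (i + 1) = pvDAt cs i := by
  rw [pvDAt_succ cs i h, pvStepD, if_neg h1, if_neg h2]

theorem pvDAt_skip {cs : List Char} {idx : Nat}
    (hsl : (cs.drop idx).take 6 = ['S','E','L','E','C','T']) :
    pvDAt cs (idx + 6) = pvDAt cs idx := by
  have hb := pvSlice_bound hsl
  have step : ∀ k, k < 6 → pvDAt cs (idx + k + 1) = pvDAt cs (idx + k) := by
    intro k hk
    have hg := pvSlice_get hsl k hk
    apply pvDAt_id_step cs (idx + k) (by omega)
    · rw [hg]; interval_cases k <;> decide
    · rw [hg]; interval_cases k <;> decide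
  calc pvDAt cs (idx + 6) = pvDAt cs (idx + 5) := step 5 (by omega)
    _ = pvDAt cs (idx + 4) := step 4 (by omega)
    _ = pvDAt cs (idx + 3) := step 3 (by omega)
    _ = pvDAt cs (idx + 2) := step 2 (by omega)
    _ = pvDAt cs (idx + 1) := step 1 (by omega)
    _ = pvDAt cs idx := step 0 (by omega)

theorem pvIsStart_false_inside {cs : List Char} {n idx j : Nat}
    (hsl : (cs.drop idx).take 6 = ['S','E','L','E','C','T'])
    (h1 : 1 ≤ j) (h5 : j ≤ 5) : pvIsStart cs n (idx + j) = false := by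
  have hw : pvWord (cs.getD (idx + j - 1) ' ') = true := by
    have hg := pvSlice_get hsl (j - 1) (by omega)
    rw [show idx + j - 1 = idx + (j - 1) from by omega, hg]
    unfold pvWord
    interval_cases j <;> decide
  have hz : (idx + j == 0) = false := by simp; omega
  unfold pvIsStart
  rw [show ((idx + j == 0 : Bool) || !pvWord (cs.getD (idx + j - 1) ' ')) = false from by
    rw [hz, hw]; rfl]
  simp

theorem pvFold_skip (cs : List Char) (n : Nat) (a : Int) {idx m : Nat}
    (hsl : (cs.drop idx).take 6 = ['S','E','L','E','C','T']) (hm : 5 ≤ m) :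
    (List.range' (idx + 1) m).foldl (pvGMax cs n) a
      = (List.range' (idx + 6) (m - 5)).foldl (pvGMax cs n) a := by
  have hsplit : List.range' (idx + 1) m
      = List.range' (idx + 1) 5 ++ List.range' (idx + 6) (m - 5) := by
    have h := @List.range'_append (idx + 1) 5 (m - 5) 1
    simp only [Nat.one_mul] at h
    rw [show idx + 1 + 5 = idx + 6 from by omega] at h
    conv_lhs => rw [show m = 5 + (m - 5) from by omega]
    exact h.symm
  rw [hsplit, List.foldl_append,
    pvGMax_noops cs n a (List.range' (idx + 1) 5) ?_]
  intro i hi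
  obtain ⟨h1, h2⟩ := List.mem_range'_1.mp hi
  rw [show i = idx + (i - idx) from by omega]
  exact pvIsStart_false_inside hsl (by omega) (by omega)

theorem pvNotS_noslice {cs : List Char} {idx : Nat}
    (hc : cs.getD idx ' ' ≠ 'S') : ¬ ((cs.drop idx).take 6 = ['S','E','L','E','C','T']) := by
  intro hsl
  have := pvSlice_get hsl 0 (by omega)
  simp at this
  exact hc this

theorem pvMainA (k : Nat) : ∀ (cs : List Char) (idx : Nat) (maxd : Int),
    cs.length - idx ≤ k → 0 ≤ maxd →
    pvLoopA cs cs.length (pvDAt cs idx) maxd idx =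
      (List.range' idx (cs.length - idx)).foldl (pvGMax cs cs.length) maxd := by
  induction k with
  | zero =>
    intro cs idx maxd hk _
    rw [pvLoopA_eq, if_neg (by omega), show cs.length - idx = 0 from by omega]
    rfl
  | succ k ih =>
    intro cs idx maxd hk h0
    by_cases h : idx < cs.length
    · have hr : cs.length - idx = (cs.length - (idx + 1)) + 1 := by omega
      rw [hr, List.range'_succ, List.foldl_cons, pvLoopA_eq, if_pos h]
      simp only []
      by_cases hp1 : cs.getD idx ' ' = '('
      · have hns := pvNotS_noslice (by rw [hp1]; decide)
        rw [if_pos hp1,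
          show pvDAt cs idx + 1 = pvDAt cs (idx + 1) from by
            rw [pvDAt_succ cs idx h, pvStepD, if_pos hp1],
          ih cs (idx + 1) maxd (by omega) h0]
        congr 1
        simp [pvGMax, pvIsStart_false_of_short (n := cs.length) hns]
      · by_cases hp2 : cs.getD idx ' ' = ')'
        · have hns := pvNotS_noslice (by rw [hp2]; decide)
          rw [if_neg hp1, if_pos hp2,
            show max (pvDAt cs idx - 1) 0 = pvDAt cs (idx + 1) from by
              rw [pvDAt_succ cs idx h, pvStepD, if_neg hp1, if_pos hp2],
            ih cs (idx + 1) maxd (by omega) h0]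
          congr 1
          simp [pvGMax, pvIsStart_false_of_short (n := cs.length) hns]
        · rw [if_neg hp1, if_neg hp2]
          by_cases hsl : (cs.drop idx).take 6 = ['S','E','L','E','C','T']
          · rw [if_pos hsl]
            have hbeq := pvBoundary_eq cs idx hsl
            by_cases hb : pvIsStart cs cs.length idx = true
            · rw [hbeq, if_pos hb]
              have hb6 := pvSlice_bound hsl
              rw [show pvDAt cs idx = pvDAt cs (idx + 6) from (pvDAt_skip hsl).symm]
              rw [ih cs (idx + 6) (max maxd (pvDAt cs (idx + 6))) (by omega)
                (le_trans h0 (le_max_left _ _))]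
              rw [pvDAt_skip hsl]
              rw [show pvGMax cs cs.length maxd idx = max maxd (pvDAt cs idx) from by
                simp [pvGMax, hb]]
              rw [pvFold_skip cs cs.length _ hsl (by omega)]
              congr 2
            · have hbf : pvIsStart cs cs.length idx = false := by
                cases hbb : pvIsStart cs cs.length idx
                · rfl
                · exact absurd hbb hb
              rw [hbeq, hbf, if_neg (by simp)]
              have hdd : pvDAt cs (idx + 1) = pvDAt cs idx := by
                apply pvDAt_id_step cs idx h
                · exact hp1
                · exact hp2
              rw [← hdd, ih cs (idx + 1) maxd (by omega) h0]
              congr 1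
              simp [pvGMax, hbf]
          · rw [if_neg hsl]
            have hbf := pvIsStart_false_of_short (n := cs.length) hsl
            have hdd : pvDAt cs (idx + 1) = pvDAt cs idx := pvDAt_id_step cs idx h hp1 hp2
            rw [← hdd, ih cs (idx + 1) maxd (by omega) h0]
            congr 1
            simp [pvGMax, hbf]
    · rw [pvLoopA_eq, if_neg h, show cs.length - idx = 0 from by omega]
      rfl

-- ===== VERDICT (by name: the statement is the Claim_ definition above) =====
theorem max_select_parenthesis_depth_py_spec : Claim_equal_max_select_parenthesis_depth_py := by
  intro s _
  unfold Spec_max_select_parenthesis_depth_py max_select_parenthesis_depth_py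
  rw [pvMainB]
  have h := pvMainA s.toList.length s.toList 0 0 (by omega) le_rfl
  simpa [pvDAt] using h
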